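-- pv_equiv track=rewrite | github.com/d-royes/personal-solutions-projects | projects/daily-task-assistant/daily_task_assistant/sync/service.py | _translate_priority
-- ===== SOURCE A (Python) =====
-- from typing import Any, Dict, List, Optional, Tuple
--
-- PERSONAL_PRIORITY_VALUES = ["Critical", "Urgent", "Important", "Standard", "Low"]
--
-- WORK_PRIORITY_VALUES = ["5-Critical", "4-Urgent", "3-Important", "2-Standard", "1-Low"]
--
-- PRIORITY_TO_WORK_FORMAT: Dict[str, str] = {
--     "Critical": "5-Critical",
--     "Urgent": "4-Urgent",
--     "Important": "3-Important",
--     "Standard": "2-Standard",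
--     "Low": "1-Low",
-- }
--
-- def _translate_priority(value: Optional[str], domain: str) -> str:
--     """Translate priority to domain-specific Smartsheet format.
--
--     Args:
--         value: Priority string (e.g., "Standard", "Critical")
--         domain: Task domain ("personal", "church", or "work")
--
--     Returns:
--         Smartsheet-formatted priority string
--     """
--     if not value:
--         if domain == "work":
--             return "2-Standard"
--         return "Standard"
--
--     # Work domain uses numbered priorities
--     if domain == "work":
--         # If already in work format, return as-is
--         if value in WORK_PRIORITY_VALUES:
--             return value
--         # Convert from personal format
--         return PRIORITY_TO_WORK_FORMAT.get(value, "2-Standard")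
--
--     # Personal/church use plain text priorities
--     if value in PERSONAL_PRIORITY_VALUES:
--         return value
--
--     # Try to convert from work format
--     for personal, work in PRIORITY_TO_WORK_FORMAT.items():
--         if value == work:
--             return personal
--
--     return "Standard"
-- ===== SOURCE B (Python) =====
-- PERSONAL_PRIORITY_VALUES = ["Critical", "Urgent", "Important", "Standard", "Low"]
--
-- WORK_PRIORITY_VALUES = ["5-Critical", "4-Urgent", "3-Important", "2-Standard", "1-Low"]
--
-- PRIORITY_TO_WORK_FORMAT = {
--     "Critical": "5-Critical",
--     "Urgent": "4-Urgent",
--     "Important": "3-Important",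
--     "Standard": "2-Standard",
--     "Low": "1-Low",
-- }
--
--
-- def _canonical(value):
--     """Canonical personal-format priority for any input."""
--     if not value:
--         return "Standard"
--     if value in PERSONAL_PRIORITY_VALUES:
--         return value
--     for personal, work in PRIORITY_TO_WORK_FORMAT.items():
--         if value == work:
--             return personal
--     return "Standard"
--
--
-- def _translate_priority(value, domain):
--     canonical = _canonical(value)
--     if domain == "work":
--         return PRIORITY_TO_WORK_FORMAT.get(canonical, "2-Standard")
--     return canonical
-- ===== Notes on version B (the rewrite author's own statement) =====
-- stated objective: alternative
-- what changed: Replaced domain-first branching (separate work/personal lookup paths) by a two-phase normalize-then-format pipeline: first compute the canonical personal priority for any input, then render it per domain.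
import Mathlib
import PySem

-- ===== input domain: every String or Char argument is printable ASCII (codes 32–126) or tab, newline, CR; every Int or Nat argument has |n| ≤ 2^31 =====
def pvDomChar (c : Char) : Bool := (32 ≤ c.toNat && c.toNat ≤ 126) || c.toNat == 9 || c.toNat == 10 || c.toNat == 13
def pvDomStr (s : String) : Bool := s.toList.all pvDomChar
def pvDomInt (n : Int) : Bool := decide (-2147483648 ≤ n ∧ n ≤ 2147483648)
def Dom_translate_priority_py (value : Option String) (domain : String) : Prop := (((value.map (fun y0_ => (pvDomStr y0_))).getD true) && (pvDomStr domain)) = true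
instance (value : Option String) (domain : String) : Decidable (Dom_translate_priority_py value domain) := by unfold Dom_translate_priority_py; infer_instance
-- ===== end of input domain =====

-- B restructures A's domain-first branching into a normalize-then-format pipeline (objective: alternative decomposition).

-- ===== PORT A =====
def pvPersonalVals : List String := ["Critical", "Urgent", "Important", "Standard", "Low"]
def pvWorkVals : List String := ["5-Critical", "4-Urgent", "3-Important", "2-Standard", "1-Low"]
def pvP2W : PySem.Dict String String :=
  PySem.Dict.mk [("Critical", "5-Critical"), ("Urgent", "4-Urgent"), ("Important", "3-Important"),
   ("Standard", "2-Standard"), ("Low", "1-Low")]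

-- the 'for personal, work in PRIORITY_TO_WORK_FORMAT.items(): if value == work: return personal' loop
def pvFindPersonal : List (String × String) → String → String
  | [], _ => "Standard"
  | (p, w) :: rest, v => if v = w then p else pvFindPersonal rest v

def translate_priority_py (value : Option String) (domain : String) : String :=
  match value with
  | none => if domain = "work" then "2-Standard" else "Standard"
  | some v =>
    if v = "" then (if domain = "work" then "2-Standard" else "Standard")
    else if domain = "work" then
      if v ∈ pvWorkVals then v
      else PySem.Dict.getD pvP2W v "2-Standard"
    else if v ∈ pvPersonalVals then v
    else pvFindPersonal pvP2W.items v

-- ===== PORT B =====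
def pvCanonical (value : Option String) : String :=
  match value with
  | none => "Standard"
  | some v =>
    if v = "" then "Standard"
    else if v ∈ pvPersonalVals then v
    else pvFindPersonal pvP2W.items v

def translate_priority_py_alt (value : Option String) (domain : String) : String :=
  let canonical := pvCanonical value
  if domain = "work" then PySem.Dict.getD pvP2W canonical "2-Standard"
  else canonical

-- ===== PRECONDITION & SPEC =====
def Spec_translate_priority_py (value : Option String) (domain : String) (out : String) : Prop := out = translate_priority_py_alt value domain
instance (value : Option String) (domain : String) (out : String) : Decidable (Spec_translate_priority_py value domain out) := by unfold Spec_translate_priority_py; infer_instance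

-- ===== CLAIM (what is proved, stated in full; the proofs are below) =====
def Claim_equal_translate_priority_py : Prop := ∀ (value : Option String) (domain : String), Dom_translate_priority_py value domain → Spec_translate_priority_py value domain (translate_priority_py value domain)

-- ===== LEMMAS AND PROOFS =====

-- getD through the full pvP2W pipeline of pvCanonical's last stage agrees with A's work branch
lemma getD_p2w_not_personal (v : String) (h : v ∉ pvPersonalVals) :
    PySem.Dict.getD pvP2W v "2-Standard" = "2-Standard" := by
  simp [pvPersonalVals] at h
  obtain ⟨h1, h2, h3, h4, h5⟩ := h
  have e1 : ("Critical" == v) = false := beq_eq_false_iff_ne.mpr (Ne.symm h1)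
  have e2 : ("Urgent" == v) = false := beq_eq_false_iff_ne.mpr (Ne.symm h2)
  have e3 : ("Important" == v) = false := beq_eq_false_iff_ne.mpr (Ne.symm h3)
  have e4 : ("Standard" == v) = false := beq_eq_false_iff_ne.mpr (Ne.symm h4)
  have e5 : ("Low" == v) = false := beq_eq_false_iff_ne.mpr (Ne.symm h5)
  simp [pvP2W, PySem.Dict.getD, PySem.Dict.get?, List.find?, e1, e2, e3, e4, e5]

lemma findPersonal_not_work (v : String) (h : v ∉ pvWorkVals) :
    pvFindPersonal pvP2W.items v = "Standard" := by
  simp [pvWorkVals] at h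
  obtain ⟨h1, h2, h3, h4, h5⟩ := h
  simp [pvP2W, pvFindPersonal, h1, h2, h3, h4, h5]

lemma getD_standard : PySem.Dict.getD pvP2W "Standard" "2-Standard" = "2-Standard" := by decide

lemma work_roundtrip (v : String) (hw : v ∈ pvWorkVals) (hp : v ∉ pvPersonalVals) :
    PySem.Dict.getD pvP2W (pvFindPersonal pvP2W.items v) "2-Standard" = v := by
  simp [pvWorkVals] at hw
  rcases hw with rfl | rfl | rfl | rfl | rfl <;> decide

-- ===== VERDICT (by name: the statement is the Claim_ definition above) =====
theorem translate_priority_py_spec : Claim_equal_translate_priority_py := by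
  intro value domain _
  unfold Spec_translate_priority_py translate_priority_py translate_priority_py_alt pvCanonical
  match value with
  | none => by_cases hd : domain = "work" <;> simp [hd, getD_standard]
  | some v =>
    by_cases hv : v = ""
    · by_cases hd : domain = "work" <;> simp [hv, hd, getD_standard]
    · by_cases hd : domain = "work"
      · simp only [hv, hd, if_false, if_true]
        by_cases hp : v ∈ pvPersonalVals
        · simp [hp]
          by_cases hw : v ∈ pvWorkVals
          · simp [pvPersonalVals] at hp
            rcases hp with rfl | rfl | rfl | rfl | rfl <;> simp [pvWorkVals] at hw
          · simp [hw]
        · by_cases hw : v ∈ pvWorkVals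
          · simp [hp, hw, work_roundtrip v hw hp]
          · simp [hp, hw, getD_p2w_not_personal v hp, findPersonal_not_work v hw, getD_standard]
      · simp [hv, hd]
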